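-- pv_equiv track=rewrite | github.com/bgruening/galaxytools | tools/tool_recommendation_model/extract_workflow_connections.py | read_workflow
-- ===== SOURCE A (Python) =====
-- def read_workflow(wf_id, workflow_rows):
--     """
--     Read all connections for a workflow
--     """
--     tool_parents = dict()
--     for connection in workflow_rows:
--         in_tool = connection[0]
--         out_tool = connection[1]
--         if out_tool not in tool_parents:
--             tool_parents[out_tool] = list()
--         if in_tool not in tool_parents[out_tool]:
--             tool_parents[out_tool].append(in_tool)
--     return tool_parents
-- ===== SOURCE B (Python) =====
-- def read_workflow(wf_id, workflow_rows):
--     """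
--     Read all connections for a workflow
--     """
--     children = list(dict.fromkeys(row[1] for row in workflow_rows))
--     return {
--         child: list(dict.fromkeys(row[0] for row in workflow_rows if row[1] == child))
--         for child in children
--     }
-- ===== Notes on version B (the rewrite author's own statement) =====
-- stated objective: alternative
-- what changed: A makes one pass maintaining a dict incrementally (create key on first sight, membership-test-then-append per connection); B never maintains a dict during traversal: it first computes the list of distinct child tools, then for each child re-scans the whole connection list, filters its rows and deduplicates the parents, building each output entry independently.
import Mathlib
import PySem

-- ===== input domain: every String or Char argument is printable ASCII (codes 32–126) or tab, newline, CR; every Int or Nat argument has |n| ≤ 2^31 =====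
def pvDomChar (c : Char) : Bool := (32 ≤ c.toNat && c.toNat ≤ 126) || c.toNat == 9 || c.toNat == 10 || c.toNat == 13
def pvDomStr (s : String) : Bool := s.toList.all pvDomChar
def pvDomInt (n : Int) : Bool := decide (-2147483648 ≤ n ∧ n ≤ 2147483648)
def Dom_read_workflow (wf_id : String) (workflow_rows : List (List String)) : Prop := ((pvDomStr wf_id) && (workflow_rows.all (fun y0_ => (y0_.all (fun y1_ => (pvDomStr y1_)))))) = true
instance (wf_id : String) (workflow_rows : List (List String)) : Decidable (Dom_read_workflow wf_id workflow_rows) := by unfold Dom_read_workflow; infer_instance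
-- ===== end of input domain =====

-- B replaces A's single fused pass (incrementally maintained dict with create-on-first-sight and a
-- membership test per connection) by nested scans: first the distinct child tools, then one filtered
-- rescan of all rows per child, each output entry built independently ("alternative", same result).

-- ===== PORT A =====
-- loop body of A, kept as a helper: 'for connection in workflow_rows: …'
def rwStepA (tool_parents : PySem.Dict String (List String)) (connection : List String) :
    PySem.Dict String (List String) :=
  let in_tool := PySem.List.pyGetD connection 0 ""
  let out_tool := PySem.List.pyGetD connection 1 ""
  let tool_parents :=
    if tool_parents.contains out_tool then tool_parents
    else tool_parents.insert out_tool []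
  if in_tool ∈ tool_parents.getD out_tool [] then tool_parents
  else tool_parents.modify out_tool [] (fun v => v ++ [in_tool])

def read_workflow (wf_id : String) (workflow_rows : List (List String)) : List (String × List String) :=
  (workflow_rows.foldl rwStepA PySem.Dict.empty).items

-- ===== PORT B =====
-- 'children = list(dict.fromkeys(row[1] for row in workflow_rows))' then the dict comprehension:
-- for each child, filter the whole row list and dedup its parents.
def read_workflow_alt (wf_id : String) (workflow_rows : List (List String)) : List (String × List String) :=
  let children := PySem.List.dedup (workflow_rows.map (fun r => PySem.List.pyGetD r 1 ""))
  children.map (fun child =>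
    (child, PySem.List.dedup
      ((workflow_rows.filter (fun r => PySem.List.pyGetD r 1 "" == child)).map
        (fun r => PySem.List.pyGetD r 0 ""))))

-- ===== PRECONDITION & SPEC =====
-- Pre_ excludes rows with fewer than 2 entries, on which Python's connection[0]/connection[1] raises IndexError.
def Pre_read_workflow (wf_id : String) (workflow_rows : List (List String)) : Prop :=
  ∀ c ∈ workflow_rows, 2 ≤ c.length
instance (wf_id : String) (workflow_rows : List (List String)) : Decidable (Pre_read_workflow wf_id workflow_rows) := by unfold Pre_read_workflow; infer_instance
def pvWitness_read_workflow : String × List (List String) :=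
  ("wf1", [["a", "b"], ["c", "b"], ["a", "b"], ["b", "c"]])
def Spec_read_workflow (wf_id : String) (workflow_rows : List (List String)) (out : List (String × List String)) : Prop := out = read_workflow_alt wf_id workflow_rows
instance (wf_id : String) (workflow_rows : List (List String)) (out : List (String × List String)) : Decidable (Spec_read_workflow wf_id workflow_rows out) := by unfold Spec_read_workflow; infer_instance

-- ===== CLAIM (what is proved, stated in full; the proofs are below) =====
def Claim_equal_read_workflow : Prop := ∀ (wf_id : String) (workflow_rows : List (List String)), Dom_read_workflow wf_id workflow_rows → Pre_read_workflow wf_id workflow_rows → Spec_read_workflow wf_id workflow_rows (read_workflow wf_id workflow_rows)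

-- ===== LEMMAS AND PROOFS =====

-- B's value for one child over a given row list
def rwVal (rows : List (List String)) (o : String) : List String :=
  PySem.List.dedup
    ((rows.filter (fun r => PySem.List.pyGetD r 1 "" == o)).map (fun r => PySem.List.pyGetD r 0 ""))

-- B's whole result over a given row list
def rwSpec (rows : List (List String)) : List (String × List String) :=
  (PySem.List.dedup (rows.map (fun r => PySem.List.pyGetD r 1 ""))).map (fun o => (o, rwVal rows o))

theorem rwAlt_eq_rwSpec (wf_id : String) (rows : List (List String)) :
    read_workflow_alt wf_id rows = rwSpec rows := rfl

theorem rw_get?_map_mem (ch : List String) (val : String → List String) (o : String) (h : o ∈ ch) :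
    (PySem.Dict.mk (ch.map (fun o' => (o', val o')))).get? o = some (val o) := by
  induction ch with
  | nil => cases h
  | cons a t ih =>
    rw [List.map_cons, PySem.Dict.get?_mk_cons]
    by_cases hao : (a == o) = true
    · simp [eq_of_beq hao]
    · have : o ∈ t := by
        cases h with
        | head => exact absurd (by simp) hao
        | tail _ h => exact h
      simp [hao, ih this]

theorem rw_get?_map_not_mem (ch : List String) (val : String → List String) (o : String)
    (h : o ∉ ch) :
    (PySem.Dict.mk (ch.map (fun o' => (o', val o')))).get? o = none := by
  induction ch with
  | nil => rfl
  | cons a t ih =>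
    rw [List.map_cons, PySem.Dict.get?_mk_cons]
    have hao : (a == o) = false := by
      simp only [beq_eq_false_iff_ne]; intro he; exact h (he ▸ List.mem_cons_self ..)
    simp [hao, ih (fun ht => h (List.mem_cons_of_mem _ ht))]

-- the one-step invariant: A's loop body maps B's result for a prefix to B's result for prefix ++ [c]
theorem rw_step (pre : List (List String)) (c : List String) :
    rwStepA (PySem.Dict.mk (rwSpec pre)) c = PySem.Dict.mk (rwSpec (pre ++ [c])) := by
  dsimp only [rwStepA]
  set i := PySem.List.pyGetD c 0 "" with hi
  set o := PySem.List.pyGetD c 1 "" with ho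
  set d := PySem.Dict.mk (rwSpec pre) with hd
  set ch := PySem.List.dedup (pre.map (fun r => PySem.List.pyGetD r 1 "")) with hch
  have hspec : rwSpec pre = ch.map (fun o' => (o', rwVal pre o')) := rfl
  by_cases hmem : o ∈ pre.map (fun r => PySem.List.pyGetD r 1 "")
  · -- child already seen
    have hmemch : o ∈ ch := by
      rw [hch, PySem.List.dedup_eq_ofList, PySem.Set.mem_ofList]; exact hmem
    have hget : d.get? o = some (rwVal pre o) := by
      rw [hd, hspec]; exact rw_get?_map_mem ch _ o hmemch
    have hcont : d.contains o = true := by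
      rw [PySem.Dict.contains_eq_isSome_get?, hget]; rfl
    have hgetD : d.getD o [] = rwVal pre o := PySem.Dict.getD_of_get?_eq_some d [] hget
    have hchildren :
        PySem.List.dedup ((pre ++ [c]).map (fun r => PySem.List.pyGetD r 1 "")) = ch := by
      rw [List.map_append, List.map_singleton, ← ho, PySem.List.dedup_eq_ofList,
        PySem.Set.ofList_append_singleton, hch, PySem.List.dedup_eq_ofList]
      exact PySem.Set.add_of_mem (by rw [PySem.Set.mem_ofList]; exact hmem)
    have hvalne : ∀ o', o' ≠ o → rwVal (pre ++ [c]) o' = rwVal pre o' := by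
      intro o' hne
      have : (PySem.List.pyGetD c 1 "" == o') = false := by
        simp only [beq_eq_false_iff_ne, ← ho]; exact fun h => hne h.symm
      simp [rwVal, List.filter_append, this]
    have hfilter : (pre ++ [c]).filter (fun r => PySem.List.pyGetD r 1 "" == o) =
        pre.filter (fun r => PySem.List.pyGetD r 1 "" == o) ++ [c] := by
      simp [List.filter_append, ← ho]
    set fmap := (pre.filter (fun r => PySem.List.pyGetD r 1 "" == o)).map
        (fun r => PySem.List.pyGetD r 0 "") with hfmap
    have hvalo : rwVal (pre ++ [c]) o = PySem.List.dedup (fmap ++ [i]) := by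
      rw [rwVal, hfilter, List.map_append]; rfl
    by_cases hin : i ∈ fmap
    · -- duplicate parent: nothing changes
      have hival : i ∈ rwVal pre o := by
        rw [rwVal, ← hfmap, PySem.List.mem_dedup]; exact hin
      have hvalsame : rwVal (pre ++ [c]) o = rwVal pre o := by
        rw [hvalo, PySem.List.dedup_eq_ofList, PySem.Set.ofList_append_singleton]
        rw [rwVal, ← hfmap, PySem.List.dedup_eq_ofList] at hival ⊢
        exact PySem.Set.add_of_mem hival
      rw [hcont]
      simp only [if_true, hgetD, hival, if_true]
      apply PySem.Dict.ext
      rw [hd]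
      show rwSpec pre = rwSpec (pre ++ [c])
      rw [hspec, rwSpec, hchildren]
      apply List.map_congr_left
      intro o' _
      by_cases ho' : o' = o
      · rw [ho', hvalsame]
      · rw [hvalne o' ho']
    · -- new parent for an existing child: append
      have hival : i ∉ rwVal pre o := by
        rw [rwVal, ← hfmap, PySem.List.mem_dedup]; exact hin
      have hvalapp : rwVal (pre ++ [c]) o = rwVal pre o ++ [i] := by
        rw [hvalo, PySem.List.dedup_eq_ofList, PySem.Set.ofList_append_singleton]
        rw [rwVal, ← hfmap, PySem.List.dedup_eq_ofList] at hival ⊢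
        exact PySem.Set.add_of_not_mem hival
      rw [hcont]
      simp only [if_true, hgetD, hival, if_false]
      have hmod : d.modify o [] (fun v => v ++ [i]) = d.insert o (rwVal pre o ++ [i]) := by
        rw [PySem.Dict.modify, hgetD]
      rw [hmod]
      apply PySem.Dict.ext
      rw [PySem.Dict.items_insert_of_contains d _ hcont, hd]
      show (rwSpec pre).map _ = rwSpec (pre ++ [c])
      rw [hspec, rwSpec, hchildren, List.map_map]
      apply List.map_congr_left
      intro o' _
      by_cases ho' : o' = o
      · simp [Function.comp, ho', hvalapp]
      · have : (o' == o) = false := by simp [ho']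
        simp [Function.comp, this, hvalne o' ho']
  · -- fresh child: a new entry is appended
    have hnotch : o ∉ ch := by
      rw [hch, PySem.List.dedup_eq_ofList, PySem.Set.mem_ofList]; exact hmem
    have hget : d.get? o = none := by
      rw [hd, hspec]; exact rw_get?_map_not_mem ch _ o hnotch
    have hcont : d.contains o = false := by
      rw [PySem.Dict.contains_eq_isSome_get?, hget]; rfl
    have hchildren :
        PySem.List.dedup ((pre ++ [c]).map (fun r => PySem.List.pyGetD r 1 "")) = ch ++ [o] := by
      rw [List.map_append, List.map_singleton, ← ho, PySem.List.dedup_eq_ofList,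
        PySem.Set.ofList_append_singleton, hch, PySem.List.dedup_eq_ofList]
      exact PySem.Set.add_of_not_mem (by rw [PySem.Set.mem_ofList]; exact hmem)
    have hLHS : (if i ∈ (if d.contains o = true then d else d.insert o []).getD o [] then
          (if d.contains o = true then d else d.insert o [])
        else (if d.contains o = true then d else d.insert o []).modify o [] fun v => v ++ [i]) =
        d.insert o [i] := by
      rw [hcont]
      simp only [Bool.false_eq_true, if_false]
      rw [PySem.Dict.getD_insert_self]
      simp only [List.not_mem_nil, if_false]
      rw [PySem.Dict.modify, PySem.Dict.getD_insert_self, PySem.Dict.insert_insert_self,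
        List.nil_append]
    rw [hLHS]
    have hfilpre : pre.filter (fun r => PySem.List.pyGetD r 1 "" == o) = [] := by
      rw [List.filter_eq_nil_iff]
      intro r hr h
      exact hmem (eq_of_beq h ▸ List.mem_map_of_mem hr)
    have hvalo : rwVal (pre ++ [c]) o = [i] := by
      have hco : (PySem.List.pyGetD c 1 "" == o) = true := by rw [← ho]; exact beq_self_eq_true _
      rw [rwVal, List.filter_append, hfilpre, List.nil_append]
      simp only [List.filter_cons, hco, if_true, List.filter_nil, List.map_cons, List.map_nil]
      rw [PySem.List.dedup_eq_ofList]
      exact PySem.Set.ofList_eq_self_of_nodup [PySem.List.pyGetD c 0 ""] (List.nodup_singleton _)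
    have hvalne : ∀ o', o' ∈ ch → rwVal (pre ++ [c]) o' = rwVal pre o' := by
      intro o' ho'
      have hne : o' ≠ o := fun he => hnotch (he ▸ ho')
      have : (PySem.List.pyGetD c 1 "" == o') = false := by
        simp only [beq_eq_false_iff_ne, ← ho]; exact fun h => hne h.symm
      simp [rwVal, List.filter_append, this]
    apply PySem.Dict.ext
    rw [PySem.Dict.items_insert_of_not_contains d _ hcont, hd]
    show rwSpec pre ++ [(o, [i])] = rwSpec (pre ++ [c])
    rw [hspec, rwSpec, hchildren, List.map_append, List.map_singleton, hvalo]
    congr 1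
    apply List.map_congr_left
    intro o' ho'
    rw [hvalne o' ho']

theorem rw_fold (rows pre : List (List String)) :
    rows.foldl rwStepA (PySem.Dict.mk (rwSpec pre)) = PySem.Dict.mk (rwSpec (pre ++ rows)) := by
  induction rows generalizing pre with
  | nil => rw [List.foldl_nil, List.append_nil]
  | cons c rows ih =>
    rw [List.foldl_cons, rw_step pre c, ih (pre ++ [c]), List.append_assoc]
    rfl

-- ===== VERDICT (by name: the statement is the Claim_ definition above) =====
theorem read_workflow_spec : Claim_equal_read_workflow := by
  intro wf_id rows _ _
  unfold Spec_read_workflow read_workflow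
  have h0 : (PySem.Dict.empty : PySem.Dict String (List String)) = PySem.Dict.mk (rwSpec []) := rfl
  rw [h0, rw_fold rows [], List.nil_append, rwAlt_eq_rwSpec]
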